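-- pv_equiv track=rewrite | github.com/redst4r/rnaseqtools | rnaseqtools/seqerrors/transcript_errors.py | _get_1BP_2BP_mutants
-- ===== SOURCE A (Python) =====
-- def _get_1BP_mutants(seq:str, position:int):
--     "return the three 1BP mutations of a sequence at the given position"
--     for base in ['A', 'C', 'G', 'T']:
--         new = seq[:position] + base + seq[position+1:]
--         if seq != new:
--             yield new
--
-- def _get_1BP_2BP_mutants(seq):
--     for i in range(len(seq)):
--         for bp1_mut in _get_1BP_mutants(seq, i):
--             yield bp1_mut
--             for j in range(i+1, len(seq)):
--                 for bp2_mut in _get_1BP_mutants(bp1_mut, j):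
--                     if bp2_mut != seq:
--                         yield bp2_mut
-- ===== SOURCE B (Python) =====
-- def _get_1BP_2BP_mutants(seq):
--     "single recursive generator: 1BP mutants at positions >= start, each followed by its deeper mutants"
--     def rec(s, start, depth):
--         for pos in range(start, len(s)):
--             for base in 'ACGT':
--                 if base != s[pos]:
--                     m = s[:pos] + base + s[pos + 1:]
--                     yield m
--                     if depth > 1:
--                         yield from rec(m, pos + 1, depth - 1)
--     yield from rec(seq, 0, 2)
-- ===== Notes on version B (the rewrite author's own statement) =====
-- stated objective: alternative
-- what changed: Replaced the 1BP-mutant helper plus two nested iterative loops (with a dead bp2!=seq guard) by a single uniform recursive generator rec(s, start, depth) that yields each mutant and recurses with depth-1 from the next position.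
import Mathlib
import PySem

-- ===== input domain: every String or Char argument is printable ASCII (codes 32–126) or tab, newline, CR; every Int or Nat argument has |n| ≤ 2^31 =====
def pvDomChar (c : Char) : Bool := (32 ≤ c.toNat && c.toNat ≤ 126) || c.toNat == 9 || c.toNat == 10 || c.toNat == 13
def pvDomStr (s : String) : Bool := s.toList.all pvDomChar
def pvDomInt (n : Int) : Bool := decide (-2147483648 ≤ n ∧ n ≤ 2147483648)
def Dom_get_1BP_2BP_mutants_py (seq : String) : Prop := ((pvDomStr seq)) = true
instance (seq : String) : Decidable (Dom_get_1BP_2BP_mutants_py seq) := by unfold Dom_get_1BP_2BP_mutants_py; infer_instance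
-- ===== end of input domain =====

-- B replaces the 1BP helper plus two nested loops (and A's dead `bp2 != seq` guard) by one
-- uniform recursive generator rec(s, start, depth); same values, same order (objective: alternative).

-- ===== PORT A =====
-- port of the helper _get_1BP_mutants(seq, position), its yields collected into a list
def pvMut1 (seq : List Char) (position : Int) : List (List Char) :=
  (['A', 'C', 'G', 'T']).foldl (fun acc base =>
    let new := PySem.List.slice seq none (some position) ++ [base] ++
               PySem.List.slice seq (some (position + 1)) none
    if seq ≠ new then acc ++ [new] else acc) []

def get_1BP_2BP_mutants_py (seq : String) : List String :=
  let cs := seq.toList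
  ((PySem.List.pyRange 0 (cs.length : Int) 1).foldl (fun acc i =>
    (pvMut1 cs i).foldl (fun acc bp1 =>
      let acc := acc ++ [bp1]
      (PySem.List.pyRange (i + 1) (cs.length : Int) 1).foldl (fun acc j =>
        (pvMut1 bp1 j).foldl (fun acc bp2 =>
          if bp2 ≠ cs then acc ++ [bp2] else acc) acc) acc) acc) []).map String.mk

-- ===== PORT B =====
-- rec(s, start, depth) from Source B; s[pos] is ported with pyGetD: every pos drawn from
-- range(start, len(s)) with 0 ≤ start is in range, so Python never raises there and the
-- default is never used.
def pvRec (s : List Char) (start : Int) (depth : Nat) : List (List Char) :=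
  (PySem.List.pyRange start (s.length : Int) 1).foldl (fun acc pos =>
    ("ACGT".toList).foldl (fun acc base =>
      if base ≠ PySem.List.pyGetD s pos 'A' then
        let m := PySem.List.slice s none (some pos) ++ [base] ++
                 PySem.List.slice s (some (pos + 1)) none
        let acc1 := acc ++ [m]
        if _h : 1 < depth then acc1 ++ pvRec m (pos + 1) (depth - 1) else acc1
      else acc) acc) []
termination_by depth
decreasing_by omega

def get_1BP_2BP_mutants_py_alt (seq : String) : List String :=
  (pvRec seq.toList 0 2).map String.mk

-- ===== PRECONDITION & SPEC =====
def Spec_get_1BP_2BP_mutants_py (seq : String) (out : List String) : Prop := out = get_1BP_2BP_mutants_py_alt seq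
instance (seq : String) (out : List String) : Decidable (Spec_get_1BP_2BP_mutants_py seq out) := by unfold Spec_get_1BP_2BP_mutants_py; infer_instance

-- ===== CLAIM (what is proved, stated in full; the proofs are below) =====
def Claim_equal_get_1BP_2BP_mutants_py : Prop := ∀ (seq : String), Dom_get_1BP_2BP_mutants_py seq → Spec_get_1BP_2BP_mutants_py seq (get_1BP_2BP_mutants_py seq)

-- ===== LEMMAS AND PROOFS =====

-- canonical substitution: s with position k replaced by b
def pvSub (s : List Char) (k : Nat) (b : Char) : List Char :=
  s.take k ++ b :: s.drop (k + 1)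

-- canonical list of the 1BP mutants of s at Nat position k
def pvMuts (s : List Char) (k : Nat) : List (List Char) :=
  ((['A', 'C', 'G', 'T']).filter (fun b => b ≠ s.getD k 'A')).map (pvSub s k)

-- workhorse: a foldl whose body appends a block per element is init ++ flatMap
theorem pvFold {α β : Type} (l : List α) (body : List β → α → List β) (F : α → List β)
    (h : ∀ x ∈ l, ∀ acc, body acc x = acc ++ F x) :
    ∀ init, l.foldl body init = init ++ l.flatMap F := by
  induction l with
  | nil => simp
  | cons x t ih =>
      intro init
      rw [List.foldl_cons, h x (by simp), ih (fun y hy acc => h y (by simp [hy]) acc)]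
      simp

-- foldl with a conditional per-element block
theorem pvFoldIfFlat {α β : Type} (l : List α) (p : α → Prop) [DecidablePred p] (g : α → List β) :
    ∀ init, l.foldl (fun acc x => if p x then acc ++ g x else acc) init
      = init ++ (l.filter (fun x => decide (p x))).flatMap g := by
  induction l with
  | nil => simp
  | cons x t ih =>
      intro init
      by_cases hx : p x <;> simp [hx, ih, List.append_assoc]

theorem pvFlatMapSingleton {α β : Type} (l : List α) (f : α → β) :
    l.flatMap (fun x => [f x]) = l.map f := by
  induction l with
  | nil => simp
  | cons x t ih => simp [ih]

theorem pvSlice_eq (s : List Char) (i : Int) (b : Char) (hi : 0 ≤ i) :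
    PySem.List.slice s none (some i) ++ [b] ++ PySem.List.slice s (some (i + 1)) none
      = pvSub s i.toNat b := by
  rw [PySem.List.slice_to s hi, PySem.List.slice_from s (by omega)]
  have : (i + 1).toNat = i.toNat + 1 := by omega
  simp [pvSub, this]

theorem pvSlice_eq' (s : List Char) (i : Int) (b : Char) (hi : 0 ≤ i) :
    PySem.List.slice s none (some i) ++ b :: PySem.List.slice s (some (i + 1)) none
      = pvSub s i.toNat b := by
  rw [← List.singleton_append, ← List.append_assoc]
  exact pvSlice_eq s i b hi

theorem pvSub_length (s : List Char) (k : Nat) (b : Char) (hk : k < s.length) :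
    (pvSub s k b).length = s.length := by
  simp [pvSub]
  omega

theorem pvSub_getElem?_lt (s : List Char) (k : Nat) (b : Char) (i : Nat)
    (hik : i < k) (hk : k < s.length) :
    (pvSub s k b)[i]? = s[i]? := by
  rw [pvSub, List.getElem?_append_left (by simp; omega)]
  simp [hik]

theorem pvSub_getElem?_self (s : List Char) (k : Nat) (b : Char) (hk : k < s.length) :
    (pvSub s k b)[k]? = some b := by
  rw [pvSub, List.getElem?_append_right (by simp)]
  simp [List.length_take, Nat.min_eq_left (Nat.le_of_lt hk)]

theorem pvSub_eq_self_iff (s : List Char) (k : Nat) (b : Char) (hk : k < s.length) :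
    (pvSub s k b = s) ↔ b = s[k] := by
  constructor
  · intro h
    have := congrArg (fun l => l[k]?) h
    simp only [] at this
    rw [pvSub_getElem?_self s k b hk] at this
    simp [List.getElem?_eq_getElem hk] at this
    exact this
  · rintro rfl
    rw [pvSub, ← List.drop_eq_getElem_cons hk, List.take_append_drop]

theorem pvMuts_mem (s : List Char) (k : Nat) (m : List Char) (hk : k < s.length)
    (h : m ∈ pvMuts s k) : ∃ b, b ≠ s[k] ∧ m = pvSub s k b := by
  rw [pvMuts] at h
  obtain ⟨b, hb, rfl⟩ := List.mem_map.mp h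
  refine ⟨b, ?_, rfl⟩
  have := List.of_mem_filter hb
  simpa [List.getD, List.getElem?_eq_getElem hk] using this

theorem pvMut1_eq (s : List Char) (i : Int) (hi : 0 ≤ i) (hn : i < (s.length : Int)) :
    pvMut1 s i = pvMuts s i.toNat := by
  have hk : i.toNat < s.length := by omega
  simp only [pvMut1]
  rw [pvFoldIfFlat ['A', 'C', 'G', 'T'] (fun b => s ≠ PySem.List.slice s none (some i) ++ [b] ++ PySem.List.slice s (some (i + 1)) none) (fun b => [PySem.List.slice s none (some i) ++ [b] ++ PySem.List.slice s (some (i + 1)) none]) []]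
  rw [pvMuts]
  rw [show ((['A', 'C', 'G', 'T']).filter fun b => decide (s ≠ PySem.List.slice s none (some i) ++ [b] ++ PySem.List.slice s (some (i + 1)) none))
        = ((['A', 'C', 'G', 'T']).filter fun b => b ≠ s.getD i.toNat 'A') from
    List.filter_congr (fun b _ => by
      simp only [pvSlice_eq s i b hi]
      simp [List.getD, List.getElem?_eq_getElem hk,
        (eq_comm (a := s)).trans (pvSub_eq_self_iff s i.toNat b hk)])]
  simp [pvSlice_eq s i (hi := hi), pvFlatMapSingleton]

theorem pvGuard (cs bp1 bp2 : List Char) (k1 k2 : Nat) (h1 : k1 < cs.length)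
    (hb : bp1 ∈ pvMuts cs k1) (h12 : k1 < k2) (h2 : k2 < bp1.length)
    (hm : bp2 ∈ pvMuts bp1 k2) : bp2 ≠ cs := by
  obtain ⟨b1, hb1, rfl⟩ := pvMuts_mem cs k1 bp1 h1 hb
  obtain ⟨b2, hb2, rfl⟩ := pvMuts_mem _ k2 bp2 h2 hm
  intro hEq
  have hget : (pvSub (pvSub cs k1 b1) k2 b2)[k1]? = some b1 := by
    rw [pvSub_getElem?_lt _ k2 b2 k1 h12 h2, pvSub_getElem?_self cs k1 b1 h1]
  rw [hEq, List.getElem?_eq_getElem h1] at hget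
  exact hb1 (by simpa using hget.symm)

theorem pvRec_one (s : List Char) (start : Int) (hs : 0 ≤ start) :
    pvRec s start 1 = (PySem.List.pyRange start (s.length : Int) 1).flatMap
      (fun j => pvMuts s j.toNat) := by
  rw [pvRec]
  refine ((pvFold _ _ (fun j => pvMuts s j.toNat) ?_) []).trans (by simp)
  intro pos hpos acc
  have hb := (PySem.List.mem_pyRange_one.mp hpos)
  have h0 : (0:Int) ≤ pos := by omega
  have hk : pos.toNat < s.length := by omega
  simp only [show ((1:Nat) < 1) = False from by simp, dite_false]
  rw [pvFoldIfFlat ("ACGT".toList) (fun base => base ≠ PySem.List.pyGetD s pos 'A') (fun base => [PySem.List.slice s none (some pos) ++ [base] ++ PySem.List.slice s (some (pos + 1)) none]) acc]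
  congr 1
  rw [pvMuts, show ("ACGT".toList) = ['A', 'C', 'G', 'T'] from rfl]
  rw [show ((['A', 'C', 'G', 'T']).filter fun b => decide (b ≠ PySem.List.pyGetD s pos 'A'))
        = ((['A', 'C', 'G', 'T']).filter fun b => b ≠ s.getD pos.toNat 'A') from
    List.filter_congr (fun b _ => by
      simp [PySem.List.pyGetD_eq_getElem s 'A' h0 hb.2, List.getD,
        List.getElem?_eq_getElem hk])]
  simp [pvSlice_eq s pos (hi := h0), pvFlatMapSingleton]

theorem pvRec_two (s : List Char) :
    pvRec s 0 2 = (PySem.List.pyRange 0 (s.length : Int) 1).flatMap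
      (fun i => (pvMuts s i.toNat).flatMap (fun m => m :: pvRec m (i + 1) 1)) := by
  rw [pvRec]
  refine ((pvFold _ _ (fun i => (pvMuts s i.toNat).flatMap (fun m => m :: pvRec m (i + 1) 1)) ?_) []).trans (by simp)
  intro pos hpos acc
  have hb := (PySem.List.mem_pyRange_one.mp hpos)
  have h0 : (0:Int) ≤ pos := hb.1
  have hk : pos.toNat < s.length := by omega
  simp only [show ((1:Nat) < 2) = True from by simp, dite_true, List.append_assoc,
    List.singleton_append]
  rw [pvFoldIfFlat ("ACGT".toList) (fun base => base ≠ PySem.List.pyGetD s pos 'A') (fun base => ((PySem.List.slice s none (some pos) ++ base :: PySem.List.slice s (some (pos + 1)) none) :: pvRec (PySem.List.slice s none (some pos) ++ base :: PySem.List.slice s (some (pos + 1)) none) (pos + 1) (2 - 1))) acc]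
  congr 1
  rw [pvMuts, show ("ACGT".toList) = ['A', 'C', 'G', 'T'] from rfl]
  rw [show ((['A', 'C', 'G', 'T']).filter fun b => decide (b ≠ PySem.List.pyGetD s pos 'A'))
        = ((['A', 'C', 'G', 'T']).filter fun b => b ≠ s.getD pos.toNat 'A') from
    List.filter_congr (fun b _ => by
      simp [PySem.List.pyGetD_eq_getElem s 'A' h0 hb.2, List.getD,
        List.getElem?_eq_getElem hk])]
  simp [pvSlice_eq' s pos (hi := h0), List.flatMap_map]

theorem pvMain (cs : List Char) :
    ((PySem.List.pyRange 0 (cs.length : Int) 1).foldl (fun acc i =>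
      (pvMut1 cs i).foldl (fun acc bp1 =>
        let acc := acc ++ [bp1]
        (PySem.List.pyRange (i + 1) (cs.length : Int) 1).foldl (fun acc j =>
          (pvMut1 bp1 j).foldl (fun acc bp2 =>
            if bp2 ≠ cs then acc ++ [bp2] else acc) acc) acc) acc) [])
      = pvRec cs 0 2 := by
  rw [pvRec_two]
  refine ((pvFold _ _ (fun i => (pvMuts cs i.toNat).flatMap (fun m => m :: pvRec m (i + 1) 1)) ?_) []).trans (by simp)
  intro i hi acc
  have hbi := PySem.List.mem_pyRange_one.mp hi
  have hk1 : i.toNat < cs.length := by omega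
  simp only []
  rw [pvMut1_eq cs i hbi.1 hbi.2]
  refine pvFold _ _ (fun bp1 => bp1 :: pvRec bp1 (i + 1) 1) ?_ acc
  intro bp1 hbp1 acc
  have hlen : bp1.length = cs.length := by
    obtain ⟨b1, _, rfl⟩ := pvMuts_mem cs i.toNat bp1 hk1 hbp1
    exact pvSub_length cs i.toNat b1 hk1
  simp only []
  rw [pvRec_one bp1 (i + 1) (by omega), hlen]
  rw [pvFold _ _ (fun j => pvMuts bp1 j.toNat) ?_ (acc ++ [bp1])]
  · simp
  · intro j hj acc2
    have hbj := PySem.List.mem_pyRange_one.mp hj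
    have hj0 : (0:Int) ≤ j := by omega
    have hk2 : j.toNat < bp1.length := by omega
    rw [pvMut1_eq bp1 j hj0 (by omega)]
    rw [pvFoldIfFlat _ (fun bp2 => bp2 ≠ cs) (fun bp2 => [bp2]) acc2]
    rw [show ((pvMuts bp1 j.toNat).filter fun bp2 => decide (bp2 ≠ cs))
          = pvMuts bp1 j.toNat from
      List.filter_eq_self.mpr (fun bp2 hbp2 => by
        simpa using pvGuard cs bp1 bp2 i.toNat j.toNat hk1 hbp1 (by omega) hk2 hbp2)]
    simp

-- ===== VERDICT (by name: the statement is the Claim_ definition above) =====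
theorem get_1BP_2BP_mutants_py_spec : Claim_equal_get_1BP_2BP_mutants_py := by
  intro seq _
  unfold Spec_get_1BP_2BP_mutants_py get_1BP_2BP_mutants_py get_1BP_2BP_mutants_py_alt
  simp only []
  rw [pvMain seq.toList]
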